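-- pv_equiv track=rewrite | github.com/Ancha2702/python_3 | 5.py | fibbonachi
-- ===== SOURCE A (Python) =====
-- def fibbonachi(n):
--     """Расчет негафибоначчи
--
--     Args:
--         n (_int_): число до которого идет расчет (зеркальное) например, вводим 3
--         выводится интервал чисел от [-3...3]
--
--     Returns:
--         fib_list список_: _возвращает список чисел негафибоначчи и фибоначчи_в заданном интервале
--     """
--     fib_list=[]
--     a, b = 1, 1
--     for i in range(0,n-1):
--         fib_list.append(a)
--         a, b = b, a + b
--     a, b = 0, 1
--     for i in range (n):
--         fib_list.insert(0, a)
--         a, b = b, a - b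
--     return fib_list
-- ===== SOURCE B (Python) =====
-- def fibbonachi(n):
--     if n <= 0:
--         return []
--     # one forward pass: F = [F_0, ..., F_{n-1}]
--     F = [0]
--     a, b = 1, 0
--     for _ in range(n - 1):
--         F.append(a)
--         a, b = a + b, a
--     # negative half by the identity F_{-k} = (-1)**(k+1) * F_k
--     neg = [F[k] if k % 2 else -F[k] for k in range(n - 1, 0, -1)]
--     return neg + F
-- ===== Notes on version B (the rewrite author's own statement) =====
-- stated objective: idiomatic
-- what changed: Replaces A's second subtractive recurrence with repeated insert(0) by one forward Fibonacci pass plus the nega-Fibonacci sign identity (mirror the forward values, negating the even-indexed ones), concatenating the mirrored half in front in a single list concatenation.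
import Mathlib
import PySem

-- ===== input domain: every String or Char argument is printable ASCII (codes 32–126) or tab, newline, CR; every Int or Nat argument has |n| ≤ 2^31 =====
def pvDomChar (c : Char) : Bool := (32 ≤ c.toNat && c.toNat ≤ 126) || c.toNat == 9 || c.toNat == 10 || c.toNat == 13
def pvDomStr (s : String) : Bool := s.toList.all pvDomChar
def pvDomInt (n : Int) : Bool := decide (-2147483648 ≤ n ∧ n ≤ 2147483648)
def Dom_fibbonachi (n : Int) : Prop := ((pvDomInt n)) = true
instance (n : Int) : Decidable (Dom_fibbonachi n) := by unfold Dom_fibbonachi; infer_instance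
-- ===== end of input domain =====

-- B replaces A's quadratic insert(0) loop with the nega-Fibonacci sign identity over one forward pass (idiomatic rewrite).

-- ===== PORT A =====
def fibbonachi (n : Int) : List Int :=
  -- first loop: for i in range(0, n-1): fib_list.append(a); a, b = b, a + b
  let s1 := (PySem.List.pyRange 0 (n - 1) 1).foldl
    (fun (st : List Int × Int × Int) _ => (st.1 ++ [st.2.1], st.2.2, st.2.1 + st.2.2))
    ([], 1, 1)
  -- second loop: for i in range(n): fib_list.insert(0, a); a, b = b, a - b
  let s2 := (PySem.List.pyRange 0 n 1).foldl
    (fun (st : List Int × Int × Int) _ => (st.2.1 :: st.1, st.2.2, st.2.1 - st.2.2))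
    (s1.1, 0, 1)
  s2.1

-- ===== PORT B =====
def fibbonachi_alt (n : Int) : List Int :=
  if n ≤ 0 then []
  else
    -- forward pass: F = [0]; for _ in range(n-1): F.append(a); a, b = a+b, a
    let s := (PySem.List.pyRange 0 (n - 1) 1).foldl
      (fun (st : List Int × Int × Int) _ => (st.1 ++ [st.2.1], st.2.1 + st.2.2, st.2.1))
      ([0], 1, 0)
    let F := s.1
    -- neg = [F[k] if k % 2 else -F[k] for k in range(n-1, 0, -1)]
    -- F[k] would raise for out-of-range k; here 1 ≤ k ≤ n-1 < len(F), so pyGet? is always some and .getD 0 is exact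
    let neg := (PySem.List.pyRange (n - 1) 0 (-1)).map (fun k =>
      if PySem.Int.mod k 2 ≠ 0 then (PySem.List.pyGet? F k).getD 0
      else -((PySem.List.pyGet? F k).getD 0))
    neg ++ F

-- ===== PRECONDITION & SPEC =====
def Spec_fibbonachi (n : Int) (out : List Int) : Prop := out = fibbonachi_alt n
instance (n : Int) (out : List Int) : Decidable (Spec_fibbonachi n out) := by unfold Spec_fibbonachi; infer_instance

-- ===== CLAIM (what is proved, stated in full; the proofs are below) =====
def Claim_equal_fibbonachi : Prop := ∀ (n : Int), Dom_fibbonachi n → Spec_fibbonachi n (fibbonachi n)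

-- ===== LEMMAS AND PROOFS =====

-- reference positive Fibonacci: 0, 1, 1, 2, 3, ...
def pvFib : Nat → Int
  | 0 => 0
  | 1 => 1
  | (k+2) => pvFib k + pvFib (k+1)

-- A's subtractive sequence 0, 1, -1, 2, -3, ... (= negafibonacci F_{-k})
def pvG : Nat → Int
  | 0 => 0
  | 1 => 1
  | (k+2) => pvG k - pvG (k+1)

-- B's sign rule
def pvH (k : Nat) : Int := if k % 2 = 1 then pvFib k else -pvFib k

theorem pvG_eq_pvH (k : Nat) : pvG k = pvH k := by
  induction k using Nat.twoStepInduction with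
  | zero => simp [pvG, pvH, pvFib]
  | one => simp [pvG, pvH, pvFib]
  | more k ih1 ih2 =>
    have h2 : (k + 2) % 2 = k % 2 := by omega
    rcases Nat.even_or_odd k with he | ho
    · have h0 : k % 2 = 0 := Nat.even_iff.mp he
      have h1 : (k + 1) % 2 = 1 := by omega
      simp [pvG, ih1, ih2, pvH, h0, h1, h2, pvFib]
      ring
    · have h0 : k % 2 = 1 := Nat.odd_iff.mp ho
      have h1 : (k + 1) % 2 = 0 := by omega
      simp [pvG, ih1, ih2, pvH, h0, h1, h2, pvFib]

-- a fold whose step ignores the elements is iteration of the step, length many times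
theorem pv_foldl_const {α β : Type} (f : α → α) (l : List β) (init : α) :
    l.foldl (fun a _ => f a) init = f^[l.length] init := by
  induction l generalizing init with
  | nil => rfl
  | cons x xs ih => simp [List.foldl_cons, ih, Function.iterate_succ_apply]

def pvStepA1 (st : List Int × Int × Int) : List Int × Int × Int :=
  (st.1 ++ [st.2.1], st.2.2, st.2.1 + st.2.2)

def pvStepA2 (st : List Int × Int × Int) : List Int × Int × Int :=
  (st.2.1 :: st.1, st.2.2, st.2.1 - st.2.2)

def pvStepB (st : List Int × Int × Int) : List Int × Int × Int :=
  (st.1 ++ [st.2.1], st.2.1 + st.2.2, st.2.1)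

theorem pvA1_iter (k : Nat) :
    pvStepA1^[k] ([], 1, 1) =
      ((List.range k).map (fun i => pvFib (i + 1)), pvFib (k + 1), pvFib (k + 2)) := by
  induction k with
  | zero => simp [pvFib]
  | succ k ih =>
    rw [Function.iterate_succ_apply', ih]
    simp [pvStepA1, List.range_succ, pvFib]

theorem pvA2_iter (k : Nat) (L : List Int) :
    pvStepA2^[k] (L, 0, 1) =
      ((List.range k).reverse.map pvG ++ L, pvG k, pvG (k + 1)) := by
  induction k with
  | zero => simp [pvG]
  | succ k ih =>
    rw [Function.iterate_succ_apply', ih]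
    have : pvG (k + 2) = pvG k - pvG (k + 1) := by simp [pvG]
    simp [pvStepA2, List.range_succ, this]

theorem pvB_iter (k : Nat) :
    pvStepB^[k] ([0], 1, 0) =
      ((List.range (k + 1)).map pvFib, pvFib (k + 1), pvFib k) := by
  induction k with
  | zero => simp [List.range_succ, pvFib]
  | succ k ih =>
    rw [Function.iterate_succ_apply', ih]
    have h1 : pvFib (k + 2) = pvFib k + pvFib (k + 1) := by simp [pvFib]
    simp [pvStepB, List.range_succ (n := k + 1), h1]
    ring

-- the mirrored negative half: reversing the nega-sequence equals B's sign-rule comprehension plus the seam 0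
theorem pv_neg_half (p : Nat) :
    (List.range (p + 1)).reverse.map pvG =
      (List.range p).map (fun j => pvH (p - j)) ++ [0] := by
  induction p with
  | zero => simp [pvG]
  | succ p ih =>
    have hL : (List.range (p + 1 + 1)).reverse.map pvG
        = pvG (p + 1) :: (List.range (p + 1)).reverse.map pvG := by
      rw [List.range_succ (n := p + 1)]; simp
    have hR : (List.range (p + 1)).map (fun j => pvH (p + 1 - j))
        = pvH (p + 1) :: (List.range p).map (fun j => pvH (p - j)) := by
      rw [List.range_succ_eq_map]
      simp only [List.map_cons, List.map_map, Nat.sub_zero]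
      congr 1
      apply List.map_congr_left
      intro j hj
      simp only [Function.comp]
      congr 1
      omega
    rw [hL, ih, hR]
    rw [pvG_eq_pvH (p + 1)]
    simp

theorem fibbonachi_eq (n : Int) : fibbonachi n = fibbonachi_alt n := by
  by_cases hn : n ≤ 0
  · have h1 : PySem.List.pyRange 0 (n - 1) 1 = [] :=
      PySem.List.pyRange_one_eq_nil (by omega)
    have h2 : PySem.List.pyRange 0 n 1 = [] :=
      PySem.List.pyRange_one_eq_nil (by omega)
    simp [fibbonachi, fibbonachi_alt, h1, h2, hn]
  · replace hn : 0 < n := by omega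
    set p : Nat := (n - 1).toNat with hp
    have hnp : n = (p : Int) + 1 := by omega
    have hA1 : (PySem.List.pyRange 0 (n - 1) 1).foldl
        (fun (st : List Int × Int × Int) _ => (st.1 ++ [st.2.1], st.2.2, st.2.1 + st.2.2))
        ([], 1, 1) =
        ((List.range p).map (fun i => pvFib (i + 1)), pvFib (p + 1), pvFib (p + 2)) := by
      rw [show (fun (st : List Int × Int × Int) (_ : Int) =>
          (st.1 ++ [st.2.1], st.2.2, st.2.1 + st.2.2)) = fun st _ => pvStepA1 st from rfl,
        pv_foldl_const, PySem.List.length_pyRange_one]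
      have : (n - 1 - 0).toNat = p := by omega
      rw [this, pvA1_iter]
    have hA2 : ∀ L : List Int, (PySem.List.pyRange 0 n 1).foldl
        (fun (st : List Int × Int × Int) _ => (st.2.1 :: st.1, st.2.2, st.2.1 - st.2.2))
        (L, 0, 1) =
        ((List.range (p + 1)).reverse.map pvG ++ L, pvG (p + 1), pvG (p + 2)) := by
      intro L
      rw [show (fun (st : List Int × Int × Int) (_ : Int) =>
          (st.2.1 :: st.1, st.2.2, st.2.1 - st.2.2)) = fun st _ => pvStepA2 st from rfl,
        pv_foldl_const, PySem.List.length_pyRange_one]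
      have : (n - 0).toNat = p + 1 := by omega
      rw [this, pvA2_iter]
    have hB : (PySem.List.pyRange 0 (n - 1) 1).foldl
        (fun (st : List Int × Int × Int) _ => (st.1 ++ [st.2.1], st.2.1 + st.2.2, st.2.1))
        ([0], 1, 0) =
        ((List.range (p + 1)).map pvFib, pvFib (p + 1), pvFib p) := by
      rw [show (fun (st : List Int × Int × Int) (_ : Int) =>
          (st.1 ++ [st.2.1], st.2.1 + st.2.2, st.2.1)) = fun st _ => pvStepB st from rfl,
        pv_foldl_const, PySem.List.length_pyRange_one]
      have : (n - 1 - 0).toNat = p := by omega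
      rw [this, pvB_iter]
    -- the whole comprehension over range(n-1, 0, -1) evaluates to the sign-rule list
    have hNeg : (PySem.List.pyRange (n - 1) 0 (-1)).map (fun k =>
        if PySem.Int.mod k 2 ≠ 0
          then (PySem.List.pyGet? ((List.range (p + 1)).map pvFib) k).getD 0
          else -((PySem.List.pyGet? ((List.range (p + 1)).map pvFib) k).getD 0))
        = (List.range p).map (fun j => pvH (p - j)) := by
      rw [PySem.List.pyRange_neg_one]
      have he : (n - 1 - 0).toNat = p := by omega
      rw [he, List.map_map]
      apply List.map_congr_left
      intro j hj
      have hjp : j < p := List.mem_range.mp hj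
      simp only [Function.comp]
      have hidx : (n - 1) - (j : Int) = ((p - j : Nat) : Int) := by omega
      rw [hidx]
      have hget : PySem.List.pyGet? ((List.range (p + 1)).map pvFib) ((p - j : Nat) : Int)
          = some (pvFib (p - j)) := by
        rw [PySem.List.pyGet?_natCast]
        simp
      have hmod : PySem.Int.mod ((p - j : Nat) : Int) 2 = (((p - j) % 2 : Nat) : Int) :=
        PySem.Int.mod_natCast (p - j) 2
      rw [hget, hmod]
      rcases Nat.even_or_odd (p - j) with he2 | ho
      · have h0 : (p - j) % 2 = 0 := Nat.even_iff.mp he2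
        simp [pvH, h0]
      · have h0 : (p - j) % 2 = 1 := Nat.odd_iff.mp ho
        simp [pvH, h0]
    simp only [fibbonachi, fibbonachi_alt, if_neg (by omega : ¬ n ≤ 0), hA1, hA2, hB, hNeg]
    rw [pv_neg_half]
    have hcons : (List.range (p + 1)).map pvFib
        = 0 :: (List.range p).map (fun i => pvFib (i + 1)) := by
      rw [List.range_succ_eq_map, List.map_cons, List.map_map]
      rfl
    rw [hcons]
    simp

-- ===== VERDICT (by name: the statement is the Claim_ definition above) =====
theorem fibbonachi_spec : Claim_equal_fibbonachi := by
  intro n _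
  exact fibbonachi_eq n
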